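-- pv_equiv track=rewrite | github.com/vii21733/hermes-home | skills/red-teaming/godmode/scripts/parseltongue.py | leetspeak
-- ===== SOURCE A (Python) =====
-- def leetspeak(text, trigger_words=None):
--     """Replace letters with numbers: h4ck, 3xpl01t"""
--     replacements = {
--         'a': '4', 'e': '3', 'i': '1', 'o': '0', 's': '5',
--         't': '7', 'l': '1', 'b': '8', 'g': '9'
--     }
--     result = text
--     for char, replacement in replacements.items():
--         result = result.replace(char, replacement).replace(char.upper(), replacement)
--     return result
-- ===== SOURCE B (Python) =====
-- def leetspeak(text, trigger_words=None):
--     """Replace letters with numbers: h4ck, 3xpl01t"""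
--     table = str.maketrans("aAeEiIoOsStTlLbBgG", "443311005577118899")
--     return text.translate(table)
-- ===== Notes on version B (the rewrite author's own statement) =====
-- stated objective: idiomatic
-- what changed: B builds one translation table with str.maketrans over both cases and does a single str.translate pass, replacing A's 18 sequential full-string .replace scans.
import Mathlib
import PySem

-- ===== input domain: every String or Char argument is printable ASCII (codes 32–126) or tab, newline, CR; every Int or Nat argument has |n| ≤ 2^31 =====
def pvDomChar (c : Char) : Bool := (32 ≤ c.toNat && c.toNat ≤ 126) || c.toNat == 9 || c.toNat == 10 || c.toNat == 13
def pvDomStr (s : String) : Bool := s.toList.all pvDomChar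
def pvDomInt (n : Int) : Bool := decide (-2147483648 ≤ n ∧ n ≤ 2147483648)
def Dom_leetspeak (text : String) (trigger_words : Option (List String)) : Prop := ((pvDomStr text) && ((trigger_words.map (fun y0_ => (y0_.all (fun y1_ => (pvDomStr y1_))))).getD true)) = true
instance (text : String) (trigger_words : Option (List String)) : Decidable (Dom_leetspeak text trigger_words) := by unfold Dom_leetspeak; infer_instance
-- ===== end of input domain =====

-- B replaces A's 18 sequential full-string .replace passes with one table-driven pass
-- (str.maketrans + str.translate); objective: idiomatic single pass, same return value.

-- ===== PORT A =====
-- A: fold over the dict's items, each step doing result.replace(char, repl).replace(char.upper(), repl)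
def leetspeak (text : String) (_trigger_words : Option (List String)) : String :=
  let replacements : PySem.Dict String String := PySem.Dict.ofList
    [("a", "4"), ("e", "3"), ("i", "1"), ("o", "0"), ("s", "5"),
     ("t", "7"), ("l", "1"), ("b", "8"), ("g", "9")]
  replacements.items.foldl
    (fun result p =>
      PySem.Str.replace (PySem.Str.replace result p.1 p.2) (PySem.Str.upper p.1) p.2)
    text

-- ===== PORT B =====
-- B: str.maketrans("aAeEiIoOsStTlLbBgG", "443311005577118899") as an association list,
-- then text.translate(table) = one map over the characters (unmapped chars pass through).
def leetspeakTable : List (Char × Char) :=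
  List.zip "aAeEiIoOsStTlLbBgG".toList "443311005577118899".toList

def leetspeak_alt (text : String) (_trigger_words : Option (List String)) : String :=
  String.ofList (text.toList.map (fun c => ((leetspeakTable.lookup c).getD c)))

-- ===== PRECONDITION & SPEC =====
def Spec_leetspeak (text : String) (trigger_words : Option (List String)) (out : String) : Prop := out = leetspeak_alt text trigger_words
instance (text : String) (trigger_words : Option (List String)) (out : String) : Decidable (Spec_leetspeak text trigger_words out) := by unfold Spec_leetspeak; infer_instance

-- ===== CLAIM (what is proved, stated in full; the proofs are below) =====
def Claim_equal_leetspeak : Prop := ∀ (text : String) (trigger_words : Option (List String)), Dom_leetspeak text trigger_words → Spec_leetspeak text trigger_words (leetspeak text trigger_words)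

-- ===== LEMMAS AND PROOFS =====

/-- single-character substitution -/
def pvSubst (c d x : Char) : Char := if x = c then d else x

/-- apply a list of single-character substitutions left to right -/
def pvApplyAll (ps : List (Char × Char)) (x : Char) : Char :=
  ps.foldl (fun y p => pvSubst p.1 p.2 y) x

theorem pvReplace_go_single (c d : Char) :
    ∀ (l acc : List Char) (fuel : Nat), l.length ≤ fuel →
      PySem.Chars.replace.go [c] [d] fuel l acc = acc.reverse ++ l.map (pvSubst c d) := by
  intro l
  induction l with
  | nil =>
    intro acc fuel _
    cases fuel <;> simp [PySem.Chars.replace.go]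
  | cons x t ih =>
    intro acc fuel hf
    cases fuel with
    | zero => simp at hf
    | succ n =>
      have ht : t.length ≤ n := by simpa using hf
      by_cases hx : x = c
      · subst hx
        have hp : List.isPrefixOf [x] (x :: t) = true := by simp [List.isPrefixOf]
        rw [PySem.Chars.replace.go, if_pos hp,
            show List.drop (List.length [x]) (x :: t) = t by simp, ih _ n ht]
        simp [pvSubst]
      · have hp : List.isPrefixOf [c] (x :: t) = false := by
          simp [List.isPrefixOf]; exact fun h => hx h.symm
        rw [PySem.Chars.replace.go, if_neg (by simp [hp]), ih _ n ht]
        simp [pvSubst, hx]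

theorem pvReplace_single (c d : Char) (l : List Char) :
    PySem.Chars.replace l [c] [d] = l.map (pvSubst c d) := by
  rw [PySem.Chars.replace, if_neg (by simp)]
  exact pvReplace_go_single c d l [] l.length le_rfl

theorem pvStrReplace_single (c d : Char) (s : String) :
    PySem.Str.replace s (String.ofList [c]) (String.ofList [d])
      = String.ofList (s.toList.map (pvSubst c d)) := by
  simp [PySem.Str.replace, pvReplace_single]

theorem pvApplyAll_of_not_key {ps : List (Char × Char)} {x : Char}
    (h : ∀ q ∈ ps, x ≠ q.1) : pvApplyAll ps x = x := by
  induction ps with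
  | nil => rfl
  | cons p ps ih =>
    have hx : x ≠ p.1 := h p (List.mem_cons_self)
    simp only [pvApplyAll, List.foldl, pvSubst, if_neg hx]
    exact ih (fun q hq => h q (List.mem_cons_of_mem _ hq))

/-- substitutions in sequence act like first-match lookup, provided no value is a key -/
theorem pvApplyAll_lookup :
    ∀ (ps : List (Char × Char)), (∀ p ∈ ps, ∀ q ∈ ps, p.2 ≠ q.1) →
      ∀ x, pvApplyAll ps x = (ps.lookup x).getD x := by
  intro ps
  induction ps with
  | nil => intro _ x; rfl
  | cons p ps ih =>
    intro h x
    have htail : ∀ p' ∈ ps, ∀ q ∈ ps, p'.2 ≠ q.1 := fun p' hp' q hq =>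
      h p' (List.mem_cons_of_mem _ hp') q (List.mem_cons_of_mem _ hq)
    by_cases hx : x = p.1
    · subst hx
      simp only [pvApplyAll, List.foldl, pvSubst, List.lookup, beq_self_eq_true,
        Option.getD_some]
      have hv : ∀ q ∈ ps, p.2 ≠ q.1 := fun q hq =>
        h p List.mem_cons_self q (List.mem_cons_of_mem _ hq)
      exact pvApplyAll_of_not_key hv
    · simp only [pvApplyAll, List.foldl, pvSubst, if_neg hx, List.lookup,
        beq_eq_false_iff_ne.mpr hx]
      exact ih htail x

theorem pvTableLit : leetspeakTable =
  [('a','4'),('A','4'),('e','3'),('E','3'),('i','1'),('I','1'),('o','0'),('O','0'),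
   ('s','5'),('S','5'),('t','7'),('T','7'),('l','1'),('L','1'),('b','8'),('B','8'),
   ('g','9'),('G','9')] := by decide

-- ===== VERDICT (by name: the statement is the Claim_ definition above) =====
set_option maxHeartbeats 1600000 in
theorem leetspeak_spec : Claim_equal_leetspeak := by
  intro text trigger_words _
  unfold Spec_leetspeak leetspeak leetspeak_alt
  show (PySem.Dict.ofList _).items.foldl _ text = _
  rw [show (PySem.Dict.ofList
      [("a", "4"), ("e", "3"), ("i", "1"), ("o", "0"), ("s", "5"),
       ("t", "7"), ("l", "1"), ("b", "8"), ("g", "9")] : PySem.Dict String String).items =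
      [("a", "4"), ("e", "3"), ("i", "1"), ("o", "0"), ("s", "5"),
       ("t", "7"), ("l", "1"), ("b", "8"), ("g", "9")] from by decide]
  simp only [List.foldl]
  have h1 : ∀ s, PySem.Str.replace s "a" "4" = String.ofList (s.toList.map (pvSubst 'a' '4')) :=
    pvStrReplace_single 'a' '4'
  have h2 : ∀ s, PySem.Str.replace s (PySem.Str.upper "a") "4" = String.ofList (s.toList.map (pvSubst 'A' '4')) :=
    pvStrReplace_single 'A' '4'
  have h3 : ∀ s, PySem.Str.replace s "e" "3" = String.ofList (s.toList.map (pvSubst 'e' '3')) :=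
    pvStrReplace_single 'e' '3'
  have h4 : ∀ s, PySem.Str.replace s (PySem.Str.upper "e") "3" = String.ofList (s.toList.map (pvSubst 'E' '3')) :=
    pvStrReplace_single 'E' '3'
  have h5 : ∀ s, PySem.Str.replace s "i" "1" = String.ofList (s.toList.map (pvSubst 'i' '1')) :=
    pvStrReplace_single 'i' '1'
  have h6 : ∀ s, PySem.Str.replace s (PySem.Str.upper "i") "1" = String.ofList (s.toList.map (pvSubst 'I' '1')) :=
    pvStrReplace_single 'I' '1'
  have h7 : ∀ s, PySem.Str.replace s "o" "0" = String.ofList (s.toList.map (pvSubst 'o' '0')) :=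
    pvStrReplace_single 'o' '0'
  have h8 : ∀ s, PySem.Str.replace s (PySem.Str.upper "o") "0" = String.ofList (s.toList.map (pvSubst 'O' '0')) :=
    pvStrReplace_single 'O' '0'
  have h9 : ∀ s, PySem.Str.replace s "s" "5" = String.ofList (s.toList.map (pvSubst 's' '5')) :=
    pvStrReplace_single 's' '5'
  have h10 : ∀ s, PySem.Str.replace s (PySem.Str.upper "s") "5" = String.ofList (s.toList.map (pvSubst 'S' '5')) :=
    pvStrReplace_single 'S' '5'
  have h11 : ∀ s, PySem.Str.replace s "t" "7" = String.ofList (s.toList.map (pvSubst 't' '7')) :=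
    pvStrReplace_single 't' '7'
  have h12 : ∀ s, PySem.Str.replace s (PySem.Str.upper "t") "7" = String.ofList (s.toList.map (pvSubst 'T' '7')) :=
    pvStrReplace_single 'T' '7'
  have h13 : ∀ s, PySem.Str.replace s "l" "1" = String.ofList (s.toList.map (pvSubst 'l' '1')) :=
    pvStrReplace_single 'l' '1'
  have h14 : ∀ s, PySem.Str.replace s (PySem.Str.upper "l") "1" = String.ofList (s.toList.map (pvSubst 'L' '1')) :=
    pvStrReplace_single 'L' '1'
  have h15 : ∀ s, PySem.Str.replace s "b" "8" = String.ofList (s.toList.map (pvSubst 'b' '8')) :=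
    pvStrReplace_single 'b' '8'
  have h16 : ∀ s, PySem.Str.replace s (PySem.Str.upper "b") "8" = String.ofList (s.toList.map (pvSubst 'B' '8')) :=
    pvStrReplace_single 'B' '8'
  have h17 : ∀ s, PySem.Str.replace s "g" "9" = String.ofList (s.toList.map (pvSubst 'g' '9')) :=
    pvStrReplace_single 'g' '9'
  have h18 : ∀ s, PySem.Str.replace s (PySem.Str.upper "g") "9" = String.ofList (s.toList.map (pvSubst 'G' '9')) :=
    pvStrReplace_single 'G' '9'
  rw [h1, h2, h3, h4, h5, h6, h7, h8, h9, h10, h11, h12, h13, h14, h15, h16, h17, h18]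
  simp only [String.toList_ofList, List.map_map]
  refine congrArg String.ofList ?_
  apply List.map_congr_left
  intro x _
  simp only [Function.comp]
  rw [show (List.lookup x leetspeakTable).getD x = pvApplyAll leetspeakTable x from
    (pvApplyAll_lookup leetspeakTable (by decide) x).symm]
  rw [pvTableLit]
  simp only [pvApplyAll, List.foldl]
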